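-- pv_equiv track=rewrite | github.com/KayanoHoro/MyEmotionAnalysis | Own.py | tags_frequency
-- ===== SOURCE A (Python) =====
-- def tags_frequency(get_tags, tags_list):    #记录词频，对比去重后的新列表和原列表，如果相同，在计数字典中value+1，最后返回字典
--     tags_dir = {}
--     for i in range(len(tags_list)):
--         tags_dir[tags_list[i]] = 0
--         for j in range(len(get_tags)):
--             if tags_list[i] == get_tags[j]:
--                 tags_dir[tags_list[i]] += 1
--     return tags_dir
-- ===== SOURCE B (Python) =====
-- def tags_frequency(get_tags, tags_list):
--     # One pass: index the wanted tags first, then count get_tags in a single scan.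
--     freq = {}
--     for t in tags_list:
--         freq[t] = 0
--     for g in get_tags:
--         if g in freq:
--             freq[g] += 1
--     return freq
-- ===== Notes on version B (the rewrite author's own statement) =====
-- stated objective: faster
-- what changed: Replaces A's nested scan (for each tags_list entry, rescan all of get_tags) by building the zeroed dict from tags_list once and then a single pass over get_tags incrementing keys present in the dict.
import Mathlib
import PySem

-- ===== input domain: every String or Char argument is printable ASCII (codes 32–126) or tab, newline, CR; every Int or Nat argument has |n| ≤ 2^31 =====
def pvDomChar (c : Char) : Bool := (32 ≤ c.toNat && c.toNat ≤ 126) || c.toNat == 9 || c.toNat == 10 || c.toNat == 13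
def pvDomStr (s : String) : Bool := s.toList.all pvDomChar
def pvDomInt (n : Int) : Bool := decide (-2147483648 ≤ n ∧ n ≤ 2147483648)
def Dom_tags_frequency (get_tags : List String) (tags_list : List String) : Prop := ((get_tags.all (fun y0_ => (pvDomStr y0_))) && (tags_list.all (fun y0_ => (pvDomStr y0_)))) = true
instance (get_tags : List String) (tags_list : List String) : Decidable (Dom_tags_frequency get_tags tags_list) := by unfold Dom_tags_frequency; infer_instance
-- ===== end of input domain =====

-- B replaces A's nested per-tag rescan of get_tags by one zero-init pass over tags_list
-- followed by a single counting pass over get_tags (objective: faster, asymptotic).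

-- ===== PORT A =====
-- literal port of A: outer loop over range(len(tags_list)), inner loop over range(len(get_tags));
-- tags_dir[t] += 1 is d.insert t (d.getD t 0 + 1) (t was just set, so the key is present).
def tags_frequency (get_tags : List String) (tags_list : List String) : List (String × Int) :=
  ((PySem.List.pyRange 0 (tags_list.length : Int) 1).foldl
    (fun d i =>
      (PySem.List.pyRange 0 (get_tags.length : Int) 1).foldl
        (fun d j =>
          if PySem.List.pyGetD tags_list i "" == PySem.List.pyGetD get_tags j "" then
            d.insert (PySem.List.pyGetD tags_list i "") (d.getD (PySem.List.pyGetD tags_list i "") 0 + 1)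
          else d)
        (d.insert (PySem.List.pyGetD tags_list i "") 0))
    PySem.Dict.empty).items

-- ===== PORT B =====
def tags_frequency_alt (get_tags : List String) (tags_list : List String) : List (String × Int) :=
  (get_tags.foldl
    (fun d g => if d.contains g then d.insert g (d.getD g 0 + 1) else d)
    (tags_list.foldl (fun d t => d.insert t (0 : Int)) PySem.Dict.empty)).items

-- ===== PRECONDITION & SPEC =====
def Spec_tags_frequency (get_tags : List String) (tags_list : List String) (out : List (String × Int)) : Prop := out = tags_frequency_alt get_tags tags_list
instance (get_tags : List String) (tags_list : List String) (out : List (String × Int)) : Decidable (Spec_tags_frequency get_tags tags_list out) := by unfold Spec_tags_frequency; infer_instance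

-- ===== CLAIM (what is proved, stated in full; the proofs are below) =====
def Claim_equal_tags_frequency : Prop := ∀ (get_tags : List String) (tags_list : List String), Dom_tags_frequency get_tags tags_list → Spec_tags_frequency get_tags tags_list (tags_frequency get_tags tags_list)

-- ===== LEMMAS AND PROOFS =====

-- A's inner loop over get_tags, started on a dict where t maps to v, adds count get_tags t to v.
theorem innerA_eq (t : String) (gt : List String) (d : PySem.Dict String Int) (v : Int) :
    gt.foldl (fun d g => if t == g then d.insert t (d.getD t 0 + 1) else d) (d.insert t v)
      = d.insert t (v + (gt.count t : Int)) := by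
  induction gt generalizing v with
  | nil => simp
  | cons g gs ih =>
    by_cases hg : t = g
    · subst hg
      simp only [List.foldl_cons, beq_self_eq_true, if_pos, PySem.Dict.getD_insert_self,
        PySem.Dict.insert_insert_self, ih, List.count_cons_self]
      congr 1
      push_cast
      ring
    · have hbeq : (t == g) = false := by simpa using hg
      simp only [List.foldl_cons, hbeq, Bool.false_eq_true, if_false, ih]
      simp [Ne.symm hg]

-- lookup in a key-indexed insert loop: the value written for a listed key, untouched otherwise.
theorem getD_insert_loop (f : String → Int) (tl : List String) (d : PySem.Dict String Int) (x : String) :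
    (tl.foldl (fun d t => d.insert t (f t)) d).getD x 0
      = if x ∈ tl then f x else d.getD x 0 := by
  induction tl generalizing d with
  | nil => simp
  | cons t ts ih =>
    simp only [List.foldl_cons, ih, PySem.Dict.getD_insert, List.mem_cons]
    by_cases hts : x ∈ ts
    · simp [hts]
    · by_cases hx : x = t <;> simp [hx, hts]

-- B's counting pass never adds keys.
theorem keys_bump_loop (gt : List String) (d : PySem.Dict String Int) :
    (gt.foldl (fun d g => if d.contains g then d.insert g (d.getD g 0 + 1) else d) d).keys
      = d.keys := by
  induction gt generalizing d with
  | nil => rfl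
  | cons g gs ih =>
    simp only [List.foldl_cons]
    by_cases hc : d.contains g = true
    · rw [if_pos hc, ih, PySem.Dict.keys_insert_of_contains _ _ hc]
    · rw [if_neg hc, ih]

-- lookup after B's counting pass: contained keys gain count get_tags k, others are untouched.
theorem getD_bump_loop (gt : List String) (d : PySem.Dict String Int) (x : String) :
    (gt.foldl (fun d g => if d.contains g then d.insert g (d.getD g 0 + 1) else d) d).getD x 0
      = if d.contains x then d.getD x 0 + (gt.count x : Int) else d.getD x 0 := by
  induction gt generalizing d with
  | nil => simp
  | cons g gs ih =>
    simp only [List.foldl_cons]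
    by_cases hc : d.contains g = true
    · rw [if_pos hc, ih]
      by_cases hx : x = g
      · subst hx
        simp [hc, PySem.Dict.getD_insert_self, List.count_cons_self]
        ring
      · have hne : (x == g) = false := by simpa using hx
        simp [PySem.Dict.contains_insert, hne, PySem.Dict.getD_insert_of_ne _ _ _ hx,
          Ne.symm hx]
    · rw [if_neg hc, ih]
      by_cases hx : x = g
      · subst hx
        have hc' : d.contains x = false := by simpa using hc
        simp [hc']
      · simp [Ne.symm hx]

-- ===== VERDICT (by name: the statement is the Claim_ definition above) =====
theorem tags_frequency_spec : Claim_equal_tags_frequency := by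
  intro gt tl _
  unfold Spec_tags_frequency tags_frequency tags_frequency_alt
  -- A's index loops become loops over the lists themselves (foldl_pyRange_zero_pyGetD')
  have h1 :
      (PySem.List.pyRange 0 (tl.length : Int) 1).foldl
        (fun d i =>
          (PySem.List.pyRange 0 (gt.length : Int) 1).foldl
            (fun d j =>
              if PySem.List.pyGetD tl i "" == PySem.List.pyGetD gt j "" then
                d.insert (PySem.List.pyGetD tl i "") (d.getD (PySem.List.pyGetD tl i "") 0 + 1)
              else d)
            (d.insert (PySem.List.pyGetD tl i "") 0))
        PySem.Dict.empty
      = tl.foldl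
          (fun (d : PySem.Dict String Int) t =>
            (PySem.List.pyRange 0 (gt.length : Int) 1).foldl
              (fun d j =>
                if t == PySem.List.pyGetD gt j "" then d.insert t (d.getD t 0 + 1) else d)
              (d.insert t 0))
          PySem.Dict.empty :=
    PySem.List.foldl_pyRange_zero_pyGetD' tl ""
      (fun (d : PySem.Dict String Int) t =>
        (PySem.List.pyRange 0 (gt.length : Int) 1).foldl
          (fun d j =>
            if t == PySem.List.pyGetD gt j "" then d.insert t (d.getD t 0 + 1) else d)
          (d.insert t 0))
      PySem.Dict.empty
  -- A's outer step = insert the full count directly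
  have hstep : ∀ (d : PySem.Dict String Int) (t : String),
      (PySem.List.pyRange 0 (gt.length : Int) 1).foldl
        (fun d j =>
          if t == PySem.List.pyGetD gt j "" then d.insert t (d.getD t 0 + 1) else d)
        (d.insert t 0)
        = d.insert t ((gt.count t : Int)) := by
    intro d t
    have h2 :
        (PySem.List.pyRange 0 (gt.length : Int) 1).foldl
          (fun d j =>
            if t == PySem.List.pyGetD gt j "" then d.insert t (d.getD t 0 + 1) else d)
          (d.insert t 0)
        = gt.foldl (fun d g => if t == g then d.insert t (d.getD t 0 + 1) else d)
            (d.insert t 0) :=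
      PySem.List.foldl_pyRange_zero_pyGetD' gt ""
        (fun d g => if t == g then d.insert t (d.getD t 0 + 1) else d) (d.insert t 0)
    rw [h2, innerA_eq]
    simp
  have hA : tl.foldl
      (fun (d : PySem.Dict String Int) t =>
        (PySem.List.pyRange 0 (gt.length : Int) 1).foldl
          (fun d j =>
            if t == PySem.List.pyGetD gt j "" then d.insert t (d.getD t 0 + 1) else d)
          (d.insert t 0))
      PySem.Dict.empty
      = tl.foldl (fun d t => d.insert t ((gt.count t : Int))) PySem.Dict.empty :=
    PySem.List.foldl_congr_mem tl _ _ PySem.Dict.empty (fun d t _ => hstep d t)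
  -- now both sides are dicts with the same (nodup) key list and the same lookups
  set dA := tl.foldl (fun d t => d.insert t ((gt.count t : Int))) PySem.Dict.empty with hdA
  set d0 := tl.foldl (fun d t => d.insert t (0 : Int)) PySem.Dict.empty with hd0
  set dB := gt.foldl (fun d g => if d.contains g then d.insert g (d.getD g 0 + 1) else d) d0 with hdB
  have hkA : dA.keys = PySem.Set.ofList tl := by
    rw [hdA, PySem.Dict.keys_foldl_insert]
    simp [PySem.Set.update_nil_left]
  have hk0 : d0.keys = PySem.Set.ofList tl := by
    rw [hd0, PySem.Dict.keys_foldl_insert]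
    simp [PySem.Set.update_nil_left]
  have hkB : dB.keys = PySem.Set.ofList tl := by rw [hdB, keys_bump_loop, hk0]
  have hndA : dA.keys.Nodup :=
    PySem.Dict.nodup_keys_foldl_insert _ _ _ PySem.Dict.nodup_keys_empty
  have hndB : dB.keys.Nodup := by
    rw [hkB, ← hkA]; exact hndA
  have hgd : ∀ x ∈ tl, dA.getD x 0 = dB.getD x 0 := by
    intro x hx
    have hc0 : d0.contains x = true := by
      rw [PySem.Dict.contains_iff_mem_keys, hk0]
      exact (PySem.Set.mem_ofList tl x).mpr hx
    rw [hdA, getD_insert_loop, if_pos hx, hdB, getD_bump_loop, if_pos hc0, hd0,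
      getD_insert_loop, if_pos hx]
    ring
  have : dA = dB := by
    apply PySem.Dict.ext
    rw [PySem.Dict.items_eq_map_keys dA hndA 0, PySem.Dict.items_eq_map_keys dB hndB 0,
      hkA, hkB]
    apply List.map_congr_left
    intro k hk
    have hk' : k ∈ tl := (PySem.Set.mem_ofList tl k).mp hk
    rw [hgd k hk']
  exact congrArg PySem.Dict.items ((h1.trans hA).trans this)
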